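-- pv_equiv track=rewrite | github.com/jeremy-neale/chess-data | static.py | detect_castling_type
-- ===== SOURCE A (Python) =====
-- def detect_castling_type(moves):
--     white_castle = None
--     black_castle = None
--
--     turns = moves.split('.')
--     for i, turn in enumerate(turns):
--         if i == 0:
--             continue
--         parts = turn.strip().split()
--
--         if len(parts) != 3:
--             continue
--
--         white_move = parts[0]
--         black_move = parts[1]
--
--         if white_castle is None:
--             if 'O-O-O' in white_move:
--                 white_castle = 'queenside'
--             elif 'O-O' in white_move:
--                 white_castle = 'kingside'
--
--         if black_castle is None:
--             if 'O-O-O' in black_move: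
--                 black_castle = 'queenside'
--             elif 'O-O' in black_move:
--                 black_castle = 'kingside'
--
--         # Save time if both have been found
--         if white_castle and black_castle:
--             break
--
--     return white_castle, black_castle
-- ===== SOURCE B (Python) =====
-- def detect_castling_type(moves):
--     def classify(m):
--         if 'O-O-O' in m:
--             return 'queenside'
--         if 'O-O' in m:
--             return 'kingside'
--         return None
--     turns = [p for p in (t.strip().split() for t in moves.split('.')[1:])
--              if len(p) == 3]
--     white_castle = next((c for p in turns if (c := classify(p[0])) is not None), None)
--     black_castle = next((c for p in turns if (c := classify(p[1])) is not None), None)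
--     return white_castle, black_castle
-- ===== Notes on version B (the rewrite author's own statement) =====
-- stated objective: simpler
-- what changed: A's single indexed loop carrying two mutable accumulators with a continue/skip and an early break is replaced by building the filtered list of 3-part turns once and doing two independent first-match scans (one per column) with a shared classify helper.
import Mathlib
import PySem

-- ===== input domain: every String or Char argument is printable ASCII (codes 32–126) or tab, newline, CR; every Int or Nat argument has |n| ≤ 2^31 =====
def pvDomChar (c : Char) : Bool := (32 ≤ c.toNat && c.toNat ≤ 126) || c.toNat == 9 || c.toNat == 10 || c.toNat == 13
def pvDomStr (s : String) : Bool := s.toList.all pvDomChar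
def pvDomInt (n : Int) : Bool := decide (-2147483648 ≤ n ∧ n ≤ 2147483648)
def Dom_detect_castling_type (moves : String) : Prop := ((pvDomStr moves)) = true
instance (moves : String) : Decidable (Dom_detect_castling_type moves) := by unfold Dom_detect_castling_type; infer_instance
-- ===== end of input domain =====

-- B re-decomposes A's single stateful loop (two accumulators + early break) into a
-- filtered turn list and two independent first-match scans; same values, objective: simpler.

-- ===== PORT A =====
-- loop over enumerate(turns) carrying (white_castle, black_castle); break when both found
def pvALoop : List String → Nat → Option String × Option String → Option String × Option String
  | [], _, st => st
  | turn :: rest, i, (wc, bc) =>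
    if i = 0 then pvALoop rest (i + 1) (wc, bc)
    else
      let parts := PySem.Str.split₀ (PySem.Str.strip turn)
      if parts.length ≠ 3 then pvALoop rest (i + 1) (wc, bc)
      else
        let white_move := parts.getD 0 ""
        let black_move := parts.getD 1 ""
        let wc' := if wc = none then
            (if PySem.Str.isIn "O-O-O" white_move then some "queenside"
             else if PySem.Str.isIn "O-O" white_move then some "kingside" else none)
          else wc
        let bc' := if bc = none then
            (if PySem.Str.isIn "O-O-O" black_move then some "queenside"
             else if PySem.Str.isIn "O-O" black_move then some "kingside" else none)
          else bc
        if wc'.isSome && bc'.isSome then (wc', bc')     -- break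
        else pvALoop rest (i + 1) (wc', bc')

def detect_castling_type (moves : String) : Option String × Option String :=
  pvALoop ((PySem.Str.split? moves ".").getD []) 0 (none, none)   -- moves.split('.'); sep ≠ "" so split? is some

-- ===== PORT B =====
def pvClassify (m : String) : Option String :=
  if PySem.Str.isIn "O-O-O" m then some "queenside"
  else if PySem.Str.isIn "O-O" m then some "kingside" else none

def pvTurns (moves : String) : List (List String) :=
  ((((PySem.Str.split? moves ".").getD []).drop 1).map
      (fun t => PySem.Str.split₀ (PySem.Str.strip t))).filter (fun p => p.length == 3)

def detect_castling_type_alt (moves : String) : Option String × Option String :=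
  let turns := pvTurns moves
  (turns.findSome? (fun p => pvClassify (p.getD 0 "")),
   turns.findSome? (fun p => pvClassify (p.getD 1 "")))

-- ===== PRECONDITION & SPEC =====
def Spec_detect_castling_type (moves : String) (out : Option String × Option String) : Prop := out = detect_castling_type_alt moves
instance (moves : String) (out : Option String × Option String) : Decidable (Spec_detect_castling_type moves out) := by unfold Spec_detect_castling_type; infer_instance

-- ===== CLAIM (what is proved, stated in full; the proofs are below) =====
def Claim_equal_detect_castling_type : Prop := ∀ (moves : String), Dom_detect_castling_type moves → Spec_detect_castling_type moves (detect_castling_type moves)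

-- ===== LEMMAS AND PROOFS =====

def pvFilt (ts : List String) : List (List String) :=
  (ts.map (fun t => PySem.Str.split₀ (PySem.Str.strip t))).filter (fun p => p.length == 3)

lemma pvIf_eq_or (o : Option String) (m : String) :
    (if o = none then
        (if PySem.Str.isIn "O-O-O" m then some "queenside"
         else if PySem.Str.isIn "O-O" m then some "kingside" else none)
      else o) = o.or (pvClassify m) := by
  cases o <;> simp [pvClassify]

lemma pvALoop_eq (ts : List String) :
    ∀ (i : Nat) (wc bc : Option String), 1 ≤ i →
      pvALoop ts i (wc, bc) =
        (wc.or ((pvFilt ts).findSome? (fun p => pvClassify (p.getD 0 ""))),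
         bc.or ((pvFilt ts).findSome? (fun p => pvClassify (p.getD 1 "")))) := by
  induction ts with
  | nil =>
    intro i wc bc _
    rw [pvALoop]
    simp [pvFilt]
  | cons t rest ih =>
    intro i wc bc hi
    have hne : i ≠ 0 := by omega
    rw [pvALoop, if_neg hne]
    by_cases hlen : (PySem.Str.split₀ (PySem.Str.strip t)).length = 3
    · have hfilt : pvFilt (t :: rest)
          = PySem.Str.split₀ (PySem.Str.strip t) :: pvFilt rest := by
        simp [pvFilt, hlen]
      rw [if_neg (by simpa using hlen), hfilt]
      simp only [pvIf_eq_or, List.findSome?_cons]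
      by_cases hbr : (wc.or (pvClassify ((PySem.Str.split₀ (PySem.Str.strip t)).getD 0 ""))).isSome
          ∧ (bc.or (pvClassify ((PySem.Str.split₀ (PySem.Str.strip t)).getD 1 ""))).isSome
      · obtain ⟨h1, h2⟩ := hbr
        rw [if_pos (by rw [Bool.and_eq_true]; exact ⟨h1, h2⟩)]
        cases hw : pvClassify ((PySem.Str.split₀ (PySem.Str.strip t)).getD 0 "") <;>
          cases hb : pvClassify ((PySem.Str.split₀ (PySem.Str.strip t)).getD 1 "") <;>
          cases wc <;> cases bc <;> simp_all [Option.or]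
      · rw [if_neg (by
          intro hcon
          exact hbr ⟨(Bool.and_eq_true _ _ |>.mp hcon).1, (Bool.and_eq_true _ _ |>.mp hcon).2⟩)]
        rw [ih (i + 1) _ _ (by omega)]
        cases pvClassify ((PySem.Str.split₀ (PySem.Str.strip t)).getD 0 "") <;>
          cases pvClassify ((PySem.Str.split₀ (PySem.Str.strip t)).getD 1 "") <;>
          cases wc <;> cases bc <;> simp [Option.or]
    · rw [if_pos (by simpa using hlen)]
      have hfilt : pvFilt (t :: rest) = pvFilt rest := by
        simp [pvFilt, hlen]
      rw [ih (i + 1) wc bc (by omega), hfilt]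

lemma pvTurns_eq_filt (moves : String) :
    pvTurns moves = pvFilt (((PySem.Str.split? moves ".").getD []).drop 1) := by
  simp [pvTurns, pvFilt]

-- ===== VERDICT (by name: the statement is the Claim_ definition above) =====
theorem detect_castling_type_spec : Claim_equal_detect_castling_type := by
  intro moves _
  unfold Spec_detect_castling_type detect_castling_type detect_castling_type_alt
  rw [pvTurns_eq_filt]
  cases h : (PySem.Str.split? moves ".").getD [] with
  | nil =>
    rw [pvALoop]
    simp [pvFilt]
  | cons t rest =>
    rw [pvALoop, if_pos rfl]
    rw [pvALoop_eq rest 1 none none (le_refl 1)]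
    simp [Option.or]
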